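-- pv_equiv track=rewrite | github.com/dennikey/Auto-Recruiter-Emailer | organizer.py | list_companies
-- ===== SOURCE A (Python) =====
-- def list_companies(text_input):
--     storage = []
--     list_companies = []
--     result = ""
--     for character in text_input:
--         if character != '\n':
--             result = result + character
--         else:
--             if "@" in result:
--                 result = ""
--             else:
--                 storage.append(result)
--                 result = ""
--
--     for elem in storage:
--         if elem != "":
--             list_companies.append(elem)
--
--     return list_companies
-- ===== SOURCE B (Python) =====
-- def list_companies(text_input):
--     lines = text_input.split('\n')[:-1]
--     return [line for line in lines if line and '@' not in line]
-- ===== Notes on version B (the rewrite author's own statement) =====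
-- stated objective: faster
-- what changed: Replaced the character-by-character accumulator state machine plus a second filtering pass with a single line-level split dropping the final unterminated segment, followed by one filtered comprehension.
import Mathlib
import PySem

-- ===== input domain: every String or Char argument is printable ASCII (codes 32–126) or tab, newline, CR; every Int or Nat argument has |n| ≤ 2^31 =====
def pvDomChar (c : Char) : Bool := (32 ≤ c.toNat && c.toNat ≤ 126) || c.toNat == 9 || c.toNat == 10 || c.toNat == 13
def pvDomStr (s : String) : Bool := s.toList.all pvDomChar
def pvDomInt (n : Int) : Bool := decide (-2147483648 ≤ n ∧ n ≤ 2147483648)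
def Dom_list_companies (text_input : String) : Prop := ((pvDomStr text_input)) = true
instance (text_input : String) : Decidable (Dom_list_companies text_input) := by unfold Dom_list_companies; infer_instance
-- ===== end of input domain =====

-- B replaces A's character-by-character state machine and second filtering pass with
-- split('\n')[:-1] plus one filtered comprehension (objective: simpler).
-- Strings being built are modeled as List Char (Python str concatenation = ++),
-- converted to String only at the return; '@' in result = PySem.Chars.isIn.

-- ===== PORT A =====
def list_companies (text_input : String) : List String :=
  -- first loop: state (storage, result)
  let p := text_input.toList.foldl
    (fun (acc : List (List Char) × List Char) character =>
      if character ≠ '\n' then (acc.1, acc.2 ++ [character])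
      else if PySem.Chars.isIn ['@'] acc.2 then (acc.1, ([] : List Char))
      else (acc.1 ++ [acc.2], ([] : List Char)))
    (([] : List (List Char)), ([] : List Char))
  -- second loop: keep non-empty elems
  (p.1.foldl (fun out elem => if elem ≠ [] then out ++ [elem] else out) []).map String.ofList

-- ===== PORT B =====
def list_companies_alt (text_input : String) : List String :=
  -- lines = text_input.split('\n')[:-1]
  let lines := PySem.List.slice (PySem.Chars.splitOn text_input.toList ['\n']) none (some (-1))
  -- [line for line in lines if line and '@' not in line]
  (lines.filter (fun line => decide (line ≠ []) && !(PySem.Chars.isIn ['@'] line))).map String.ofList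

-- ===== PRECONDITION & SPEC =====
def Spec_list_companies (text_input : String) (out : List String) : Prop := out = list_companies_alt text_input
instance (text_input : String) (out : List String) : Decidable (Spec_list_companies text_input out) := by unfold Spec_list_companies; infer_instance

-- ===== CLAIM (what is proved, stated in full; the proofs are below) =====
def Claim_equal_list_companies : Prop := ∀ (text_input : String), Dom_list_companies text_input → Spec_list_companies text_input (list_companies text_input)

-- ===== LEMMAS AND PROOFS =====

-- reference single-'\n' splitter (proof-side only)
def mySplit : List Char → List (List Char)
  | [] => [[]]
  | c :: rest => if c = '\n' then [] :: mySplit rest else (mySplit rest).modifyHead (c :: ·)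

theorem mySplit_ne_nil (l : List Char) : mySplit l ≠ [] := by
  induction l with
  | nil => simp [mySplit]
  | cons c rest ih =>
    simp only [mySplit]
    split_ifs with h
    · simp
    · cases hm : mySplit rest with
      | nil => exact absurd hm ih
      | cons a t => simp

theorem splitOn_go_eq (fuel : Nat) : ∀ (l cur : List Char) (acc : List (List Char)),
    l.length ≤ fuel →
    PySem.Chars.splitOn.go ['\n'] fuel l cur acc
      = acc.reverse ++ (mySplit l).modifyHead (cur.reverse ++ ·) := by
  induction fuel with
  | zero =>
    intro l cur acc h
    have : l = [] := List.length_eq_zero_iff.mp (Nat.le_zero.mp h)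
    subst this
    simp [PySem.Chars.splitOn.go, mySplit]
  | succ n ih =>
    intro l cur acc h
    cases l with
    | nil => simp [PySem.Chars.splitOn.go, mySplit]
    | cons c rest =>
      rw [PySem.Chars.splitOn.go]
      by_cases hc : c = '\n'
      · subst hc
        have hpre : List.isPrefixOf ['\n'] ('\n' :: rest) = true := by
          simp [List.isPrefixOf]
        rw [if_pos hpre]
        simp only [List.length_cons, List.length_nil, List.drop_succ_cons, List.drop_zero]
        rw [ih rest [] _ (by simpa using Nat.le_of_succ_le_succ h)]
        cases hm : mySplit rest with
        | nil => exact absurd hm (mySplit_ne_nil rest)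
        | cons a t => simp [mySplit, hm, List.modifyHead]
      · have hpre : List.isPrefixOf ['\n'] (c :: rest) = false := by
          simp [List.isPrefixOf]
          exact fun hh => hc hh.symm
        rw [if_neg (by simp [hpre])]
        rw [ih rest (c :: cur) acc (by simpa using Nat.le_of_succ_le_succ h)]
        cases hm : mySplit rest with
        | nil => exact absurd hm (mySplit_ne_nil rest)
        | cons a t => simp [mySplit, hm, hc, List.modifyHead]

theorem splitOn_eq_mySplit (l : List Char) :
    PySem.Chars.splitOn l ['\n'] = mySplit l := by
  rw [PySem.Chars.splitOn, splitOn_go_eq (l.length + 1) l [] [] (by omega)]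
  cases hm : mySplit l with
  | nil => exact absurd hm (mySplit_ne_nil l)
  | cons a t => simp [List.modifyHead]

theorem mySplit_no_nl (res : List Char) (h : '\n' ∉ res) : mySplit res = [res] := by
  induction res with
  | nil => rfl
  | cons c rest ih =>
    have hc : c ≠ '\n' := fun hh => h (hh ▸ List.mem_cons_self)
    have := ih (fun hm => h (List.mem_cons_of_mem _ hm))
    simp [mySplit, hc, this, List.modifyHead]

theorem mySplit_append_nl (res t : List Char) (h : '\n' ∉ res) :
    mySplit (res ++ '\n' :: t) = res :: mySplit t := by
  induction res with
  | nil => simp [mySplit]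
  | cons c rest ih =>
    have hc : c ≠ '\n' := fun hh => h (hh ▸ List.mem_cons_self)
    have := ih (fun hm => h (List.mem_cons_of_mem _ hm))
    simp [mySplit, hc, this, List.modifyHead]

theorem loopA (cs : List Char) : ∀ (sto : List (List Char)) (res : List Char), '\n' ∉ res →
    cs.foldl
      (fun (acc : List (List Char) × List Char) character =>
        if character ≠ '\n' then (acc.1, acc.2 ++ [character])
        else if PySem.Chars.isIn ['@'] acc.2 then (acc.1, ([] : List Char))
        else (acc.1 ++ [acc.2], ([] : List Char))) (sto, res)
      = (sto ++ (mySplit (res ++ cs)).dropLast.filter (fun p => !(PySem.Chars.isIn ['@'] p)),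
         (mySplit (res ++ cs)).getLastD []) := by
  induction cs with
  | nil =>
    intro sto res h
    simp [mySplit_no_nl res h]
  | cons c cs' ih =>
    intro sto res h
    by_cases hc : c = '\n'
    · subst hc
      rw [List.foldl_cons]
      simp only [ne_eq, not_true_eq_false, if_false]
      rw [mySplit_append_nl res cs' h]
      cases hm : mySplit cs' with
      | nil => exact absurd hm (mySplit_ne_nil cs')
      | cons a t =>
        by_cases hat : PySem.Chars.isIn ['@'] res = true
        · rw [if_pos hat]
          rw [ih sto [] (by simp)]
          simp [hm, hat]
        · rw [if_neg hat]
          rw [ih (sto ++ [res]) [] (by simp)]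
          simp only [Bool.not_eq_true] at hat
          simp [hm, hat]
    · rw [List.foldl_cons]
      simp only [ne_eq, hc, not_false_eq_true, if_true]
      have h' : '\n' ∉ res ++ [c] := by
        simp [List.mem_append]
        exact ⟨fun hm => h hm, fun hh => hc hh.symm⟩
      rw [ih sto (res ++ [c]) h']
      simp

-- ===== VERDICT (by name: the statement is the Claim_ definition above) =====
theorem list_companies_spec : Claim_equal_list_companies := by
  intro t _
  show list_companies t = list_companies_alt t
  simp only [list_companies, list_companies_alt]
  rw [loopA t.toList [] [] (by simp)]
  rw [PySem.List.foldl_append_ite_eq_filter]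
  rw [splitOn_eq_mySplit, PySem.List.slice_to_neg_one]
  simp [List.filter_filter]
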